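-- pv_equiv track=rewrite | github.com/bh2980/Algorithm-Problem | 백준/Gold/20057. 마법사 상어와 토네이도/마법사 상어와 토네이도.py | solution
-- ===== SOURCE A (Python) =====
-- def moveSand(prev_pos, current_pos, sand):
--     N = len(sand)
--
--     ci, cj = current_pos
--     pi, pj = prev_pos
--     di, dj = ci - pi, cj - pj
--
--     ALPHA = 'ALPHA'
--
--     diff = [((ci + di * 2, cj + dj * 2), 5), ((ci + dj, cj + di), 7), ((ci - dj, cj - di), 7), ((ci + dj * 2, cj + di * 2), 2), ((ci - dj * 2, cj - di * 2), 2), ((pi + dj, pj + di), 1), ((pi - dj, pj - di), 1), ((ci + di + dj, cj + dj + di), 10), ((ci + di - dj, cj + dj - di), 10), ((ci + di, cj + dj), ALPHA)]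
--
--     total_sand = sand[ci][cj]
--     move_sand = 0
--     out_sand = 0
--
--     for pos, percent in diff:
--         ni, nj = pos
--
--         if percent != ALPHA:
--             new_sand = total_sand * percent // 100
--
--             if 0 <= ni < N and 0 <= nj < N:
--                 sand[ni][nj] += new_sand
--                 move_sand += new_sand
--             else:
--                 move_sand += new_sand
--                 out_sand += new_sand
--         else:
--             if 0 <= ni < N and 0 <= nj < N:
--                 sand[ni][nj] += total_sand - move_sand
--             else:
--                 out_sand += total_sand - move_sand
--
--     sand[ci][cj] = 0
--
--     return out_sand
--
-- def solution(n, sand):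
--     oi, oj = n // 2, n // 2
--
--     # center를 기준으로 회오리 모양으로 순회
--
--     # left, down, right, up
--     di = [0, 1, 0, -1]
--     dj = [-1, 0, 1, 0]
--
--     idx = 0
--
--     ci, cj = oi, oj
--
--     out_sand = 0
--
--     for length in range(1, n+1):
--         for _ in range(2):
--             dci, dcj = di[idx], dj[idx]
--
--             for _ in range(length):
--                 pi, pj = ci, cj
--                 ci, cj = ci + dci, cj + dcj
--
--                 out_sand += moveSand((pi, pj), (ci, cj), sand)
--
--                 # printMap(sand)
--
--                 if (ci, cj) == (0, 0):
--                     break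
--
--             if (ci, cj) == (0, 0):
--                 break
--
--             idx = (idx + 1) % 4
--
--         if (ci, cj) == (0, 0):
--             break
--
--     return out_sand
-- ===== SOURCE B (Python) =====
-- def solution(n, sand):
--     # Tornado spiral via closed-form ring corners; per cell, pick the sand up
--     # first, compute the nine shares and the remainder upfront, then classify
--     # targets in/out of the board in one pass.
--     if n < 2:
--         return 0
--     N = len(sand)
--     c = n // 2
--     out = 0
--
--     def scatter(pi, pj, ci, cj):
--         di, dj = ci - pi, cj - pj
--         total = sand[ci][cj]
--         sand[ci][cj] = 0
--         shares = [((2 * di, 2 * dj), 5), ((dj, di), 7), ((-dj, -di), 7),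
--                   ((2 * dj, 2 * di), 2), ((-2 * dj, -2 * di), 2),
--                   ((dj - di, di - dj), 1), ((-di - dj, -di - dj), 1),
--                   ((di + dj, di + dj), 10), ((di - dj, dj - di), 10)]
--         moved = [((ci + oi, cj + oj), total * p // 100) for (oi, oj), p in shares]
--         moved.append(((ci + di, cj + dj), total - sum(a for _, a in moved)))
--         blown = 0
--         for (ti, tj), amt in moved:
--             if 0 <= ti < N and 0 <= tj < N:
--                 sand[ti][tj] += amt
--             else:
--                 blown += amt
--         return blown
--
--     def walk(a, b):
--         (ai, aj), (bi, bj) = a, b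
--         di = (bi > ai) - (bi < ai)
--         dj = (bj > aj) - (bj < aj)
--         s = 0
--         i, j = ai, aj
--         while (i, j) != (bi, bj):
--             s += scatter(i, j, i + di, j + dj)
--             i, j = i + di, j + dj
--         return s
--
--     def corner(k):
--         if k % 2 == 0:
--             return (c - k // 2, c + k // 2)
--         return (c + (k + 1) // 2, c - (k + 1) // 2)
--
--     prev = (c, c)
--     for k in range(1, n):
--         end = corner(k)
--         mid = (prev[0], end[1])
--         out += walk(prev, mid) + walk(mid, end)
--         prev = end
--     out += walk((0, n - 1), (0, 0))
--     return out
-- ===== Notes on version B (the rewrite author's own statement) =====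
-- stated objective: alternative
-- what changed: B replaces A's direction-table state machine with closed-form ring corners (each ring's two corner points computed arithmetically, connected by straight walks, the last walk ending at (0,0) so all three nested early-break guards disappear) and rewrites the per-cell spread: pick the sand up first (cell zeroed before distributing), compute the nine shares and the leftover 'alpha' amount upfront by subtraction from the total, then classify all ten targets in/out of the board in one flat pass with no running move_sand accumulator and no ALPHA string sentinel.
-- outside the precondition, e.g. on solution(1, [[7, 7], [7, 7]]): A returns 14, B returns 0; on solution(2, [[7, 7, 7], [7, 7, 7], [7, 7, 7]]): A returns 42, B returns 21; on solution(3, [[1, 2], [3, 4], [5, 6]]): A raises IndexError, B raises IndexError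
import Mathlib
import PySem

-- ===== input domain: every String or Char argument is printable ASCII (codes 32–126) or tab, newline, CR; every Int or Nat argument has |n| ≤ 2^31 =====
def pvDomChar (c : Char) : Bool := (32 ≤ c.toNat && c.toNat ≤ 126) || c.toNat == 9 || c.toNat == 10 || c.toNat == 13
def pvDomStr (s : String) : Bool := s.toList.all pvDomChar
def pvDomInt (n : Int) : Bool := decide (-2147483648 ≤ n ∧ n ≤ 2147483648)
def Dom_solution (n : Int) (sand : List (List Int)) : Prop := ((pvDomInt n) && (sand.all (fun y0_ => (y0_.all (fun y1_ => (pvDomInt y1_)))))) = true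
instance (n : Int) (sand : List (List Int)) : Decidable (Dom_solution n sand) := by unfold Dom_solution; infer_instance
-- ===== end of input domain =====

-- B walks the tornado by closed-form ring corners and rewrites the per-cell spread
-- (sand picked up first, nine shares and the leftover computed upfront, one flat
-- in/out classification pass); objective: alternative. Both Pythons mutate `sand`
-- in place to the same final grid; the equivalence proved is about the return value.

-- ===== PORT A =====
-- sand[i][j] read; exact where Python does not raise (guaranteed by Pre_)
def getCell (sand : List (List Int)) (i j : Int) : Int :=
  ((PySem.List.pyGet? sand i).bind (fun row => PySem.List.pyGet? row j)).getD 0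

-- sand[i][j] += v under the 0 ≤ i,j < N guard; exact where Python does not raise (Pre_)
def addCell (sand : List (List Int)) (i j : Int) (v : Int) : List (List Int) :=
  sand.modify i.toNat (fun row => row.modify j.toNat (· + v))

-- sand[ci][cj] = 0; indices are in range and nonnegative under Pre_
def setCellZero (sand : List (List Int)) (i j : Int) : List (List Int) :=
  sand.modify i.toNat (fun row => row.set j.toNat 0)

-- moveSand: literal transliteration (ALPHA encoded as `none` percent)
def moveSand (prev current : Int × Int) (sand : List (List Int)) : List (List Int) × Int :=
  let N : Int := sand.length
  let ci := current.1; let cj := current.2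
  let pi := prev.1; let pj := prev.2
  let di := ci - pi; let dj := cj - pj
  let diff : List ((Int × Int) × Option Int) :=
    [((ci + di * 2, cj + dj * 2), some 5), ((ci + dj, cj + di), some 7), ((ci - dj, cj - di), some 7),
     ((ci + dj * 2, cj + di * 2), some 2), ((ci - dj * 2, cj - di * 2), some 2),
     ((pi + dj, pj + di), some 1), ((pi - dj, pj - di), some 1),
     ((ci + di + dj, cj + dj + di), some 10), ((ci + di - dj, cj + dj - di), some 10),
     ((ci + di, cj + dj), none)]
  let total := getCell sand ci cj
  let fin := diff.foldl (fun (acc : List (List Int) × Int × Int) pp =>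
      let ni := pp.1.1; let nj := pp.1.2
      match pp.2 with
      | some percent =>
        let newSand := PySem.Int.floordiv (total * percent) 100
        if 0 ≤ ni ∧ ni < N ∧ 0 ≤ nj ∧ nj < N then
          (addCell acc.1 ni nj newSand, acc.2.1 + newSand, acc.2.2)
        else (acc.1, acc.2.1 + newSand, acc.2.2 + newSand)
      | none =>
        if 0 ≤ ni ∧ ni < N ∧ 0 ≤ nj ∧ nj < N then
          (addCell acc.1 ni nj (total - acc.2.1), acc.2.1, acc.2.2)
        else (acc.1, acc.2.1, acc.2.2 + (total - acc.2.1))) (sand, 0, 0)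
  (setCellZero fin.1 ci cj, fin.2.2)

def diA : List Int := [0, 1, 0, -1]
def djA : List Int := [-1, 0, 1, 0]

structure StA where
  ci : Int
  cj : Int
  idx : Int
  sand : List (List Int)
  out : Int
deriving Repr

-- inner `for _ in range(length)` with its break at (0,0)
def legA : Nat → Int → Int → StA → StA
  | 0, _, _, st => st
  | Nat.succ k, dci, dcj, st =>
      let ci := st.ci + dci; let cj := st.cj + dcj
      let r := moveSand (st.ci, st.cj) (ci, cj) st.sand
      let st' : StA := { st with ci := ci, cj := cj, sand := r.1, out := st.out + r.2 }
      if ci = 0 ∧ cj = 0 then st' else legA k dci dcj st'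

-- `for _ in range(2)` with its break and the idx update
def twoA : Nat → Int → StA → StA
  | 0, _, st => st
  | Nat.succ t, length, st =>
      let dci := (PySem.List.pyGet? diA st.idx).getD 0
      let dcj := (PySem.List.pyGet? djA st.idx).getD 0
      let st' := legA length.toNat dci dcj st
      if st'.ci = 0 ∧ st'.cj = 0 then st'
      else twoA t length { st' with idx := PySem.Int.mod (st'.idx + 1) 4 }

-- `for length in range(1, n+1)` with its break
def outerA : List Int → StA → StA
  | [], st => st
  | L :: rest, st =>
      let st' := twoA 2 L st
      if st'.ci = 0 ∧ st'.cj = 0 then st' else outerA rest st'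

def solution (n : Int) (sand : List (List Int)) : Int :=
  let oi := PySem.Int.floordiv n 2
  (outerA (PySem.List.pyRange 1 (n + 1) 1) ⟨oi, oi, 0, sand, 0⟩).out

-- ===== PORT B =====
-- the in/out classification pass of B's scatter: add in-board shares, sum the blown-out ones
def classify (N : Int) (L : List ((Int × Int) × Int)) (s : List (List Int)) (o : Int) :
    List (List Int) × Int :=
  L.foldl (fun (acc : List (List Int) × Int) e =>
    let ti := e.1.1; let tj := e.1.2
    if 0 ≤ ti ∧ ti < N ∧ 0 ≤ tj ∧ tj < N then (addCell acc.1 ti tj e.2, acc.2)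
    else (acc.1, acc.2 + e.2)) (s, o)

-- B's scatter: zero the cell first, build all ten (target, amount) pairs upfront, classify
def scatterB (prev cur : Int × Int) (s : List (List Int)) : List (List Int) × Int :=
  let N : Int := s.length
  let ci := cur.1; let cj := cur.2
  let di := ci - prev.1; let dj := cj - prev.2
  let total := getCell s ci cj
  let s0 := setCellZero s ci cj
  let shares : List ((Int × Int) × Int) :=
    [((2 * di, 2 * dj), 5), ((dj, di), 7), ((-dj, -di), 7), ((2 * dj, 2 * di), 2),
     ((-2 * dj, -2 * di), 2), ((dj - di, di - dj), 1), ((-di - dj, -di - dj), 1),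
     ((di + dj, di + dj), 10), ((di - dj, dj - di), 10)]
  let moved := shares.map (fun q => ((ci + q.1.1, cj + q.1.2), PySem.Int.floordiv (total * q.2) 100))
  classify N (moved ++ [((ci + di, cj + dj), total - (moved.map (·.2)).sum)]) s0 0

-- B's `while (i, j) != (bi, bj)` walk; the fuel (the L1 distance) makes it total
def walkLoop : Nat → Int → Int → Int → Int → Int → Int → List (List Int) × Int →
    List (List Int) × Int
  | 0, _, _, _, _, _, _, acc => acc
  | f + 1, i, j, bi, bj, di, dj, acc =>
      if i = bi ∧ j = bj then acc
      else
        let r := scatterB (i, j) (i + di, j + dj) acc.1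
        walkLoop f (i + di) (j + dj) bi bj di dj (r.1, acc.2 + r.2)

def walkB (a b : Int × Int) (acc : List (List Int) × Int) : List (List Int) × Int :=
  let di := (if a.1 < b.1 then (1 : Int) else 0) - (if b.1 < a.1 then 1 else 0)
  let dj := (if a.2 < b.2 then (1 : Int) else 0) - (if b.2 < a.2 then 1 else 0)
  walkLoop ((b.1 - a.1).natAbs + (b.2 - a.2).natAbs) a.1 a.2 b.1 b.2 di dj acc

-- closed-form corner of ring k
def cornerB (c k : Int) : Int × Int :=
  if PySem.Int.mod k 2 = 0 then (c - PySem.Int.floordiv k 2, c + PySem.Int.floordiv k 2)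
  else (c + PySem.Int.floordiv (k + 1) 2, c - PySem.Int.floordiv (k + 1) 2)

-- `for k in range(1, n)`: two straight walks per ring, corner to corner
def ringsB : List Int → Int → Int × Int → List (List Int) × Int → List (List Int) × Int
  | [], _, _, acc => acc
  | k :: rest, c, prev, acc =>
      let endc := cornerB c k
      let mid := (prev.1, endc.2)
      ringsB rest c endc (walkB mid endc (walkB prev mid acc))

def solution_alt (n : Int) (sand : List (List Int)) : Int :=
  if n < 2 then 0
  else
    let c := PySem.Int.floordiv n 2
    let acc := ringsB (PySem.List.pyRange 1 n 1) c (c, c) (sand, 0)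
    (walkB (0, n - 1) (0, 0) acc).2

-- ===== PRECONDITION & SPEC =====
-- Pre_ is the problem's natural domain: odd n ≥ 3 with a grid big enough for every access
-- (plus the trivial n ≤ 0, where the loops never run). Outside it A generally raises
-- IndexError; where it instead returns (n = 1, or even n on oversized grids) its value comes
-- from a spiral that leaves the claimed n×n board, relying on negative-index wraparound —
-- inputs outside the tornado problem's domain, on which B's completed spiral differs.
def Pre_solution (n : Int) (sand : List (List Int)) : Prop :=
  n ≤ 0 ∨ (3 ≤ n ∧ PySem.Int.mod n 2 = 1 ∧ n ≤ sand.length ∧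
    ∀ row ∈ sand, (sand.length : Int) ≤ row.length)
instance (n : Int) (sand : List (List Int)) : Decidable (Pre_solution n sand) := by
  unfold Pre_solution; infer_instance

def pvWitness_solution : Int × List (List Int) :=
  (3, [[0, 100, 0], [50, 7, 9], [1, 2, 3]])

def Spec_solution (n : Int) (sand : List (List Int)) (out : Int) : Prop := out = solution_alt n sand
instance (n : Int) (sand : List (List Int)) (out : Int) : Decidable (Spec_solution n sand out) := by unfold Spec_solution; infer_instance

-- ===== CLAIM (what is proved, stated in full; the proofs are below) =====
def Claim_equal_solution : Prop := ∀ (n : Int) (sand : List (List Int)), Dom_solution n sand → Pre_solution n sand → Spec_solution n sand (solution n sand)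

-- ===== LEMMAS AND PROOFS =====

-- run a list of (prev, cur) moves through A's moveSand, accumulating out_sand
def runMoves (ps : List ((Int × Int) × (Int × Int))) (s : List (List Int)) (o : Int) :
    List (List Int) × Int :=
  ps.foldl (fun acc pq =>
    let r := moveSand pq.1 pq.2 acc.1
    (r.1, acc.2 + r.2)) (s, o)

-- the same through B's scatter
def runMovesS (ps : List ((Int × Int) × (Int × Int))) (s : List (List Int)) (o : Int) :
    List (List Int) × Int :=
  ps.foldl (fun acc pq =>
    let r := scatterB pq.1 pq.2 acc.1
    (r.1, acc.2 + r.2)) (s, o)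

-- the (prev, cur) pairs of a straight leg of cnt steps from p in direction d
def legSteps : Int × Int → Int × Int → Nat → List ((Int × Int) × (Int × Int))
  | _, _, 0 => []
  | p, d, Nat.succ t => (p, (p.1 + d.1, p.2 + d.2)) :: legSteps (p.1 + d.1, p.2 + d.2) d t

-- position after K full outer iterations of the tornado starting at (c, c)
def posAt (c : Int) (K : Nat) : Int × Int :=
  if K % 2 = 0 then (c - (K / 2 : Nat), c + (K / 2 : Nat))
  else (c + ((K + 1) / 2 : Nat), c - ((K + 1) / 2 : Nat))

-- moves of the outer iteration with length L starting at p
def movesLen (p : Int × Int) (L : Nat) : List ((Int × Int) × (Int × Int)) :=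
  if L % 2 = 1 then legSteps p (0, -1) L ++ legSteps (p.1, p.2 - L) (1, 0) L
  else legSteps p (0, 1) L ++ legSteps (p.1, p.2 + L) (-1, 0) L

-- moves of the first K outer iterations
def movesUpTo (c : Int) : Nat → List ((Int × Int) × (Int × Int))
  | 0 => []
  | Nat.succ K => movesUpTo c K ++ movesLen (posAt c K) (K + 1)

-- moves of iterations K+1 .. K+j (no final leg)
def movesSeg2 (m : Nat) : Nat → Nat → List ((Int × Int) × (Int × Int))
  | _, 0 => []
  | K, Nat.succ j => movesLen (posAt m K) (K + 1) ++ movesSeg2 m (K + 1) j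

theorem runMoves_append (xs ys : List ((Int × Int) × (Int × Int))) (s : List (List Int)) (o : Int) :
    runMoves (xs ++ ys) s o = runMoves ys (runMoves xs s o).1 (runMoves xs s o).2 := by
  simp [runMoves, List.foldl_append]

theorem runMoves_cons (p : (Int × Int) × (Int × Int)) (xs : List ((Int × Int) × (Int × Int)))
    (s : List (List Int)) (o : Int) :
    runMoves (p :: xs) s o = runMoves xs (moveSand p.1 p.2 s).1 (o + (moveSand p.1 p.2 s).2) := by
  simp [runMoves]

theorem runMovesS_append (xs ys : List ((Int × Int) × (Int × Int))) (s : List (List Int)) (o : Int) :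
    runMovesS (xs ++ ys) s o = runMovesS ys (runMovesS xs s o).1 (runMovesS xs s o).2 := by
  simp [runMovesS, List.foldl_append]

theorem runMovesS_cons (p : (Int × Int) × (Int × Int)) (xs : List ((Int × Int) × (Int × Int)))
    (s : List (List Int)) (o : Int) :
    runMovesS (p :: xs) s o = runMovesS xs (scatterB p.1 p.2 s).1 (o + (scatterB p.1 p.2 s).2) := by
  simp [runMovesS]

theorem legA_run (dci dcj : Int) : ∀ (cnt : Nat) (st : StA),
    (∀ k : Nat, 1 ≤ k → k ≤ cnt → ¬(st.ci + k * dci = 0 ∧ st.cj + k * dcj = 0)) →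
    legA cnt dci dcj st =
      { ci := st.ci + cnt * dci, cj := st.cj + cnt * dcj, idx := st.idx,
        sand := (runMoves (legSteps (st.ci, st.cj) (dci, dcj) cnt) st.sand st.out).1,
        out := (runMoves (legSteps (st.ci, st.cj) (dci, dcj) cnt) st.sand st.out).2 } := by
  intro cnt
  induction cnt with
  | zero => intro st _; simp [legA, legSteps, runMoves]
  | succ k ih =>
    intro st h
    have h1 : ¬(st.ci + dci = 0 ∧ st.cj + dcj = 0) := by
      have := h 1 (by omega) (by omega); simpa using this
    rw [legA, if_neg h1]
    rw [ih _ (by intro k' hk1 hk2 hc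
                 exact h (k' + 1) (by omega) (by omega)
                   (by push_cast; push_cast at hc; constructor <;> linarith [hc.1, hc.2]))]
    simp only [legSteps, runMoves_cons]
    simp [StA.mk.injEq]
    constructor <;> ring

theorem legA_break (dci dcj : Int) : ∀ (t cnt : Nat) (st : StA), t + 1 ≤ cnt →
    (∀ k : Nat, 1 ≤ k → k ≤ t → ¬(st.ci + k * dci = 0 ∧ st.cj + k * dcj = 0)) →
    (st.ci + (t + 1) * dci = 0 ∧ st.cj + (t + 1) * dcj = 0) →
    legA cnt dci dcj st =
      { ci := 0, cj := 0, idx := st.idx,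
        sand := (runMoves (legSteps (st.ci, st.cj) (dci, dcj) (t + 1)) st.sand st.out).1,
        out := (runMoves (legSteps (st.ci, st.cj) (dci, dcj) (t + 1)) st.sand st.out).2 } := by
  intro t
  induction t with
  | zero =>
    intro cnt st hcnt _ hend
    obtain ⟨c', rfl⟩ : ∃ c', cnt = c' + 1 := ⟨cnt - 1, by omega⟩
    have hend' : st.ci + dci = 0 ∧ st.cj + dcj = 0 := by
      push_cast at hend; constructor <;> linarith [hend.1, hend.2]
    rw [legA, if_pos hend']
    simp [legSteps, runMoves, hend'.1, hend'.2]
  | succ t ih =>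
    intro cnt st hcnt h hend
    obtain ⟨c', rfl⟩ : ∃ c', cnt = c' + 1 := ⟨cnt - 1, by omega⟩
    have h1 : ¬(st.ci + dci = 0 ∧ st.cj + dcj = 0) := by
      have := h 1 (by omega) (by omega); simpa using this
    rw [legA, if_neg h1]
    rw [ih c' _ (by omega)
        (by intro k' hk1 hk2 hc
            exact h (k' + 1) (by omega) (by omega)
              (by push_cast; push_cast at hc; constructor <;> linarith [hc.1, hc.2]))
        (by push_cast; push_cast at hend; constructor <;> linarith [hend.1, hend.2])]
    simp only [legSteps, runMoves_cons]

theorem twoA_zero (L : Int) (st : StA) : twoA 0 L st = st := rfl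

theorem twoA_one (L : Int) (st : StA) :
    twoA 1 L st =
      (let st' := legA L.toNat ((PySem.List.pyGet? diA st.idx).getD 0)
                    ((PySem.List.pyGet? djA st.idx).getD 0) st
       if st'.ci = 0 ∧ st'.cj = 0 then st'
       else twoA 0 L { st' with idx := PySem.Int.mod (st'.idx + 1) 4 }) := rfl

theorem twoA_two (L : Int) (st : StA) :
    twoA 2 L st =
      (let st' := legA L.toNat ((PySem.List.pyGet? diA st.idx).getD 0)
                    ((PySem.List.pyGet? djA st.idx).getD 0) st
       if st'.ci = 0 ∧ st'.cj = 0 then st'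
       else twoA 1 L { st' with idx := PySem.Int.mod (st'.idx + 1) 4 }) := rfl

theorem twoA_step (m : Nat) (hm : 1 ≤ m) (K : Nat) (hK : K < 2 * m)
    (s : List (List Int)) (o : Int) :
    twoA 2 ((K : Int) + 1)
      { ci := (posAt m K).1, cj := (posAt m K).2, idx := if K % 2 = 0 then 0 else 2,
        sand := s, out := o } =
    { ci := (posAt m (K + 1)).1, cj := (posAt m (K + 1)).2,
      idx := if (K + 1) % 2 = 0 then 0 else 2,
      sand := (runMoves (movesLen (posAt m K) (K + 1)) s o).1,
      out := (runMoves (movesLen (posAt m K) (K + 1)) s o).2 } := by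
  have htn : ((K : Int) + 1).toNat = K + 1 := by omega
  by_cases hKp : K % 2 = 0
  · -- idx = 0: left then down
    have hL : (K + 1) % 2 = 1 := by omega
    have hp : posAt m K = ((m : Int) - (K / 2 : Nat), (m : Int) + (K / 2 : Nat)) := by
      simp [posAt, hKp]
    have hidx : (if K % 2 = 0 then (0 : Int) else 2) = 0 := by simp [hKp]
    rw [twoA_two]
    simp only [hp, hidx]
    rw [show ((PySem.List.pyGet? diA (0 : Int)).getD 0) = 0 from by decide,
        show ((PySem.List.pyGet? djA (0 : Int)).getD 0) = -1 from by decide, htn]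
    rw [legA_run 0 (-1) (K + 1) _ (by intro k hk1 hk2 hc; dsimp at hc; omega)]
    dsimp only
    rw [if_neg (by push_cast; intro hc; omega)]
    rw [show PySem.Int.mod (0 + 1) 4 = 1 from by decide]
    rw [twoA_one]
    dsimp only
    rw [show ((PySem.List.pyGet? diA (1 : Int)).getD 0) = 1 from by decide,
        show ((PySem.List.pyGet? djA (1 : Int)).getD 0) = 0 from by decide, htn]
    rw [legA_run 1 0 (K + 1) _ (by intro k hk1 hk2 hc; dsimp at hc; omega)]
    dsimp only
    rw [if_neg (by push_cast; intro hc; omega)]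
    rw [twoA_zero]
    simp only [movesLen, hL, reduceIte]
    rw [runMoves_append,
        show ((m : Int) - ((K / 2 : Nat) : Int) + (((K + 1 : Nat) : Int)) * 0,
              (m : Int) + ((K / 2 : Nat) : Int) + (((K + 1 : Nat) : Int)) * -1) =
             ((m : Int) - ((K / 2 : Nat) : Int),
              (m : Int) + ((K / 2 : Nat) : Int) - (((K + 1 : Nat) : Int))) from by
          simp [Prod.ext_iff]; ring]
    have h2 : ¬((K + 1) % 2 = 0) := by omega
    simp only [StA.mk.injEq]
    refine ⟨?_, ?_, by decide, trivial, trivial⟩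
    · simp only [posAt, h2, reduceIte]; omega
    · simp only [posAt, h2, reduceIte]; omega
  · -- idx = 2: right then up
    have hL : (K + 1) % 2 = 0 := by omega
    have hp : posAt m K = ((m : Int) + (((K + 1) / 2 : Nat) : Int),
                           (m : Int) - (((K + 1) / 2 : Nat) : Int)) := by
      simp [posAt, hKp]
    have hidx : (if K % 2 = 0 then (0 : Int) else 2) = 2 := by simp [hKp]
    rw [twoA_two]
    simp only [hp, hidx]
    rw [show ((PySem.List.pyGet? diA (2 : Int)).getD 0) = 0 from by decide,
        show ((PySem.List.pyGet? djA (2 : Int)).getD 0) = 1 from by decide, htn]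
    rw [legA_run 0 1 (K + 1) _ (by intro k hk1 hk2 hc; dsimp at hc; omega)]
    dsimp only
    rw [if_neg (by push_cast; intro hc; omega)]
    rw [show PySem.Int.mod (2 + 1) 4 = 3 from by decide]
    rw [twoA_one]
    dsimp only
    rw [show ((PySem.List.pyGet? diA (3 : Int)).getD 0) = -1 from by decide,
        show ((PySem.List.pyGet? djA (3 : Int)).getD 0) = 0 from by decide, htn]
    rw [legA_run (-1) 0 (K + 1) _ (by intro k hk1 hk2 hc; dsimp at hc; omega)]
    dsimp only
    rw [if_neg (by push_cast; intro hc; omega)]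
    rw [twoA_zero]
    simp only [movesLen, hL, reduceIte]
    rw [if_neg (by decide : ¬((0 : Nat) = 1))]
    rw [runMoves_append,
        show ((m : Int) + (((K + 1) / 2 : Nat) : Int) + (((K + 1 : Nat) : Int)) * 0,
              (m : Int) - (((K + 1) / 2 : Nat) : Int) + (((K + 1 : Nat) : Int)) * 1) =
             ((m : Int) + (((K + 1) / 2 : Nat) : Int),
              (m : Int) - (((K + 1) / 2 : Nat) : Int) + (((K + 1 : Nat) : Int))) from by
          simp]
    simp only [StA.mk.injEq]
    refine ⟨?_, ?_, by decide, trivial, trivial⟩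
    · simp only [posAt, hL, reduceIte]; omega
    · simp only [posAt, hL, reduceIte]; omega

theorem posAt_ne (m : Nat) (hm : 1 ≤ m) (K : Nat) :
    ¬((posAt m K).1 = 0 ∧ (posAt m K).2 = 0) := by
  simp only [posAt]; split_ifs <;> simp <;> omega

theorem outerA_append_of_ne : ∀ (xs ys : List Int) (st : StA),
    ¬((outerA xs st).ci = 0 ∧ (outerA xs st).cj = 0) →
    outerA (xs ++ ys) st = outerA ys (outerA xs st) := by
  intro xs
  induction xs with
  | nil => intro ys st _; rfl
  | cons L rest ih =>
    intro ys st h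
    simp only [List.cons_append, outerA] at h ⊢
    by_cases hb : (twoA 2 L st).ci = 0 ∧ (twoA 2 L st).cj = 0
    · rw [if_pos hb] at h; exact absurd hb h
    · rw [if_neg hb] at h
      rw [if_neg hb, if_neg hb]
      exact ih ys _ h

theorem outerA_upto (m : Nat) (hm : 1 ≤ m) (s0 : List (List Int)) :
    ∀ K : Nat, K ≤ 2 * m →
    outerA (PySem.List.pyRange 1 ((K : Int) + 1) 1) ⟨(m : Int), (m : Int), 0, s0, 0⟩ =
      { ci := (posAt m K).1, cj := (posAt m K).2, idx := if K % 2 = 0 then 0 else 2,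
        sand := (runMoves (movesUpTo m K) s0 0).1,
        out := (runMoves (movesUpTo m K) s0 0).2 } := by
  intro K
  induction K with
  | zero =>
    intro _
    rw [show ((0 : Nat) : Int) + 1 = 1 from by norm_num,
        PySem.List.pyRange_one_eq_nil (by omega)]
    simp [outerA, posAt, movesUpTo, runMoves]
  | succ K ih =>
    intro hK
    have hKle : K ≤ 2 * m := by omega
    rw [show (((K + 1 : Nat)) : Int) + 1 = ((K : Int) + 1) + 1 from by push_cast; ring,
        PySem.List.pyRange_one_succ_right (by omega)]
    rw [outerA_append_of_ne _ _ _ (by rw [ih hKle]; exact posAt_ne m hm K)]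
    rw [ih hKle]
    simp only [outerA]
    rw [twoA_step m hm K (by omega)]
    rw [if_neg (posAt_ne m hm (K + 1))]
    rw [show movesUpTo (m : Int) (K + 1) = movesUpTo m K ++ movesLen (posAt m K) (K + 1) from rfl,
        runMoves_append]

theorem solutionA_eq (m : Nat) (hm : 1 ≤ m) (sand : List (List Int)) :
    solution (2 * (m : Int) + 1) sand =
      (runMoves (movesUpTo m (2 * m) ++ legSteps ((0 : Int), ((2 * m : Nat) : Int)) (0, -1) (2 * m))
        sand 0).2 := by
  unfold solution
  have hoi : PySem.Int.floordiv (2 * (m : Int) + 1) 2 = m := by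
    rw [PySem.Int.floordiv_eq_ediv_of_pos (by omega)]; omega
  rw [hoi]
  dsimp only
  rw [show (2 * (m : Int) + 1) + 1 = (((2 * m : Nat)) : Int) + 1 + 1 from by push_cast; ring,
      PySem.List.pyRange_one_succ_right (by omega)]
  rw [outerA_append_of_ne _ _ _
        (by rw [outerA_upto m hm sand (2 * m) le_rfl]; exact posAt_ne m hm (2 * m))]
  rw [outerA_upto m hm sand (2 * m) le_rfl]
  have hpos : posAt (m : Int) (2 * m) = ((0 : Int), ((2 * m : Nat) : Int)) := by
    simp only [posAt]
    rw [if_pos (by omega)]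
    rw [Prod.mk.injEq]
    constructor <;> omega
  have hidx : (if (2 * m) % 2 = 0 then (0 : Int) else 2) = 0 := by rw [if_pos (by omega)]
  simp only [outerA, hpos, hidx]
  rw [twoA_two]
  dsimp only
  rw [show ((PySem.List.pyGet? diA (0 : Int)).getD 0) = 0 from by decide,
      show ((PySem.List.pyGet? djA (0 : Int)).getD 0) = -1 from by decide]
  rw [show ((((2 * m : Nat)) : Int) + 1).toNat = 2 * m + 1 from by omega]
  rw [legA_break 0 (-1) (2 * m - 1) (2 * m + 1) _ (by omega)
        (by intro k hk1 hk2 hc; dsimp at hc; omega)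
        (by dsimp only; constructor <;> push_cast <;> omega)]
  dsimp only
  rw [if_pos ⟨rfl, rfl⟩]
  rw [show 2 * m - 1 + 1 = 2 * m from by omega]
  rw [if_pos ⟨rfl, rfl⟩]
  rw [runMoves_append]

-- ---------- B-side: scatter equals moveSand ----------

-- A's distribution fold, named (defeq to the inline fold of moveSand)
def distA (N total : Int) (L : List ((Int × Int) × Option Int))
    (st : List (List Int) × Int × Int) : List (List Int) × Int × Int :=
  L.foldl (fun (acc : List (List Int) × Int × Int) pp =>
      let ni := pp.1.1; let nj := pp.1.2
      match pp.2 with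
      | some percent =>
        let newSand := PySem.Int.floordiv (total * percent) 100
        if 0 ≤ ni ∧ ni < N ∧ 0 ≤ nj ∧ nj < N then
          (addCell acc.1 ni nj newSand, acc.2.1 + newSand, acc.2.2)
        else (acc.1, acc.2.1 + newSand, acc.2.2 + newSand)
      | none =>
        if 0 ≤ ni ∧ ni < N ∧ 0 ≤ nj ∧ nj < N then
          (addCell acc.1 ni nj (total - acc.2.1), acc.2.1, acc.2.2)
        else (acc.1, acc.2.1, acc.2.2 + (total - acc.2.1))) st

theorem classify_cons (N : Int) (e : (Int × Int) × Int) (L : List ((Int × Int) × Int))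
    (s : List (List Int)) (o : Int) :
    classify N (e :: L) s o =
      if 0 ≤ e.1.1 ∧ e.1.1 < N ∧ 0 ≤ e.1.2 ∧ e.1.2 < N then
        classify N L (addCell s e.1.1 e.1.2 e.2) o
      else classify N L s (o + e.2) := by
  simp only [classify, List.foldl_cons]
  split_ifs with h <;> rfl

theorem classify_append (N : Int) (X Y : List ((Int × Int) × Int)) (s : List (List Int)) (o : Int) :
    classify N (X ++ Y) s o = classify N Y (classify N X s o).1 (classify N X s o).2 := by
  simp [classify, List.foldl_append]

-- A's fold over `some`-entries is B's classify plus the running amount sum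
theorem distA_cons (N total : Int) (e : (Int × Int) × Option Int)
    (L : List ((Int × Int) × Option Int)) (st : List (List Int) × Int × Int) :
    distA N total (e :: L) st =
      distA N total L
        ((fun (acc : List (List Int) × Int × Int) (pp : (Int × Int) × Option Int) =>
          let ni := pp.1.1; let nj := pp.1.2
          match pp.2 with
          | some percent =>
            let newSand := PySem.Int.floordiv (total * percent) 100
            if 0 ≤ ni ∧ ni < N ∧ 0 ≤ nj ∧ nj < N then
              (addCell acc.1 ni nj newSand, acc.2.1 + newSand, acc.2.2)
            else (acc.1, acc.2.1 + newSand, acc.2.2 + newSand)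
          | none =>
            if 0 ≤ ni ∧ ni < N ∧ 0 ≤ nj ∧ nj < N then
              (addCell acc.1 ni nj (total - acc.2.1), acc.2.1, acc.2.2)
            else (acc.1, acc.2.1, acc.2.2 + (total - acc.2.1))) st e) := rfl

theorem distA_append (N total : Int) (X Y : List ((Int × Int) × Option Int))
    (st : List (List Int) × Int × Int) :
    distA N total (X ++ Y) st = distA N total Y (distA N total X st) := by
  simp [distA, List.foldl_append]

theorem distA_somes (N total : Int) : ∀ (L : List ((Int × Int) × Int)) (s : List (List Int))
    (m o : Int),
    distA N total (L.map (fun q => (q.1, some q.2))) (s, m, o) =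
      ((classify N (L.map (fun q => (q.1, PySem.Int.floordiv (total * q.2) 100))) s o).1,
       m + ((L.map (fun q => PySem.Int.floordiv (total * q.2) 100)).sum),
       (classify N (L.map (fun q => (q.1, PySem.Int.floordiv (total * q.2) 100))) s o).2) := by
  intro L
  induction L with
  | nil => intro s m o; simp [distA, classify]
  | cons q L ih =>
    intro s m o
    simp only [List.map_cons, List.sum_cons, distA_cons, classify_cons]
    by_cases hc : 0 ≤ q.1.1 ∧ q.1.1 < N ∧ 0 ≤ q.1.2 ∧ q.1.2 < N
    · rw [if_pos hc]
      rw [if_pos hc, ih]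
      refine Prod.ext rfl (Prod.ext ?_ rfl)
      ring
    · rw [if_neg hc]
      rw [if_neg hc, ih]
      refine Prod.ext rfl (Prod.ext ?_ rfl)
      ring

theorem modify_set_comm (row : List Int) (jn cn : Nat) (v : Int) (h : jn ≠ cn) :
    (row.modify jn (· + v)).set cn 0 = (row.set cn 0).modify jn (· + v) := by
  apply List.ext_getElem?
  intro r
  simp only [List.getElem?_set, List.getElem?_modify, List.length_modify]
  by_cases h1 : cn = r <;> by_cases h2 : jn = r
  · omega
  · simp [h1, h2]
  · simp [h1, h2]
  · simp [h1, h2]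

theorem add_zero_comm (s : List (List Int)) (i j ci cj v : Int)
    (h : i.toNat ≠ ci.toNat ∨ j.toNat ≠ cj.toNat) :
    setCellZero (addCell s i j v) ci cj = addCell (setCellZero s ci cj) i j v := by
  unfold setCellZero addCell
  apply List.ext_getElem?
  intro r
  simp only [List.getElem?_modify]
  cases hrow : s[r]? with
  | none => simp
  | some row =>
    by_cases h1 : i.toNat = r <;> by_cases h2 : ci.toNat = r <;> simp [h1, h2]
    exact modify_set_comm row j.toNat cj.toNat v (by omega)

-- zero-first commutes with classify when no in-board target collides with the zeroed cell
theorem classify_setZero (N ci cj : Int) : ∀ (L : List ((Int × Int) × Int))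
    (s : List (List Int)) (o : Int),
    (∀ e ∈ L, (0 ≤ e.1.1 ∧ e.1.1 < N ∧ 0 ≤ e.1.2 ∧ e.1.2 < N) →
      (e.1.1.toNat ≠ ci.toNat ∨ e.1.2.toNat ≠ cj.toNat)) →
    classify N L (setCellZero s ci cj) o =
      (setCellZero (classify N L s o).1 ci cj, (classify N L s o).2) := by
  intro L
  induction L with
  | nil => intro s o _; simp [classify]
  | cons e L ih =>
    intro s o h
    rw [classify_cons, classify_cons]
    by_cases hc : 0 ≤ e.1.1 ∧ e.1.1 < N ∧ 0 ≤ e.1.2 ∧ e.1.2 < N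
    · rw [if_pos hc, if_pos hc,
          ← add_zero_comm s e.1.1 e.1.2 ci cj e.2 (h e (List.mem_cons_self) hc)]
      exact ih _ _ (fun e' he' => h e' (List.mem_cons_of_mem _ he'))
    · rw [if_neg hc, if_neg hc]
      exact ih _ _ (fun e' he' => h e' (List.mem_cons_of_mem _ he'))

-- a move with a unit-axis displacement to a nonnegative cell: B's scatter = A's moveSand
def GoodMove (e : (Int × Int) × (Int × Int)) : Prop :=
  ((e.2.1 - e.1.1, e.2.2 - e.1.2) = ((0 : Int), (1 : Int)) ∨
   (e.2.1 - e.1.1, e.2.2 - e.1.2) = ((0 : Int), (-1 : Int)) ∨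
   (e.2.1 - e.1.1, e.2.2 - e.1.2) = ((1 : Int), (0 : Int)) ∨
   (e.2.1 - e.1.1, e.2.2 - e.1.2) = ((-1 : Int), (0 : Int))) ∧
  0 ≤ e.2.1 ∧ 0 ≤ e.2.2

-- A's nine (target, percent) entries / B's nine (offset, percent) entries, as proof objects
def pvL9 (pi pj ci cj : Int) : List ((Int × Int) × Int) :=
  [((ci + (ci - pi) * 2, cj + (cj - pj) * 2), 5), ((ci + (cj - pj), cj + (ci - pi)), 7),
   ((ci - (cj - pj), cj - (ci - pi)), 7), ((ci + (cj - pj) * 2, cj + (ci - pi) * 2), 2),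
   ((ci - (cj - pj) * 2, cj - (ci - pi) * 2), 2), ((pi + (cj - pj), pj + (ci - pi)), 1),
   ((pi - (cj - pj), pj - (ci - pi)), 1),
   ((ci + (ci - pi) + (cj - pj), cj + (cj - pj) + (ci - pi)), 10),
   ((ci + (ci - pi) - (cj - pj), cj + (cj - pj) - (ci - pi)), 10)]

def pvS9 (pi pj ci cj : Int) : List ((Int × Int) × Int) :=
  [((2 * (ci - pi), 2 * (cj - pj)), 5), ((cj - pj, ci - pi), 7), ((-(cj - pj), -(ci - pi)), 7),
   ((2 * (cj - pj), 2 * (ci - pi)), 2), ((-2 * (cj - pj), -2 * (ci - pi)), 2),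
   ((cj - pj - (ci - pi), ci - pi - (cj - pj)), 1),
   ((-(ci - pi) - (cj - pj), -(ci - pi) - (cj - pj)), 1),
   ((ci - pi + (cj - pj), ci - pi + (cj - pj)), 10),
   ((ci - pi - (cj - pj), cj - pj - (ci - pi)), 10)]

theorem distA_none_step (N total ti tj : Int) (g : List (List Int)) (m o : Int) :
    distA N total [((ti, tj), none)] (g, m, o) =
      if 0 ≤ ti ∧ ti < N ∧ 0 ≤ tj ∧ tj < N then (addCell g ti tj (total - m), m, o)
      else (g, m, o + (total - m)) := by
  simp only [distA, List.foldl_cons, List.foldl_nil]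

theorem classify_single (N ti tj amt : Int) (g : List (List Int)) (o : Int) :
    classify N [((ti, tj), amt)] g o =
      if 0 ≤ ti ∧ ti < N ∧ 0 ≤ tj ∧ tj < N then (addCell g ti tj amt, o) else (g, o + amt) := by
  rw [classify_cons]
  split_ifs <;> rfl

theorem scatterB_eq (p c : Int × Int) (s : List (List Int)) (h : GoodMove (p, c)) :
    scatterB p c s = moveSand p c s := by
  obtain ⟨pi, pj⟩ := p
  obtain ⟨ci, cj⟩ := c
  obtain ⟨hd, hc1, hc2⟩ := h
  simp only at hd hc1 hc2
  have hB : scatterB (pi, pj) (ci, cj) s =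
      classify (s.length)
        (((pvS9 pi pj ci cj).map
            (fun q => ((ci + q.1.1, cj + q.1.2),
              PySem.Int.floordiv (getCell s ci cj * q.2) 100))) ++
          [((ci + (ci - pi), cj + (cj - pj)),
            getCell s ci cj -
              ((((pvS9 pi pj ci cj).map
                  (fun q => ((ci + q.1.1, cj + q.1.2),
                    PySem.Int.floordiv (getCell s ci cj * q.2) 100))).map (·.2)).sum))])
        (setCellZero s ci cj) 0 := rfl
  have hA : moveSand (pi, pj) (ci, cj) s =
      (setCellZero (distA (s.length) (getCell s ci cj)
          (((pvL9 pi pj ci cj).map (fun q => (q.1, some q.2))) ++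
            [((ci + (ci - pi), cj + (cj - pj)), none)]) (s, 0, 0)).1 ci cj,
       (distA (s.length) (getCell s ci cj)
          (((pvL9 pi pj ci cj).map (fun q => (q.1, some q.2))) ++
            [((ci + (ci - pi), cj + (cj - pj)), none)]) (s, 0, 0)).2.2) := rfl
  have hLB : (((pvS9 pi pj ci cj).map
        (fun q => ((ci + q.1.1, cj + q.1.2),
          PySem.Int.floordiv (getCell s ci cj * q.2) 100))) ++
      [((ci + (ci - pi), cj + (cj - pj)),
        getCell s ci cj -
          ((((pvS9 pi pj ci cj).map
              (fun q => ((ci + q.1.1, cj + q.1.2),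
                PySem.Int.floordiv (getCell s ci cj * q.2) 100))).map (·.2)).sum))]) =
      (((pvL9 pi pj ci cj).map
          (fun q => (q.1, PySem.Int.floordiv (getCell s ci cj * q.2) 100))) ++
        [((ci + (ci - pi), cj + (cj - pj)),
          getCell s ci cj -
            (((pvL9 pi pj ci cj).map
                (fun q => PySem.Int.floordiv (getCell s ci cj * q.2) 100)).sum))]) := by
    simp only [pvS9, pvL9, List.map_cons, List.map_nil, List.sum_cons, List.sum_nil,
      List.cons_append, List.nil_append, List.cons.injEq, Prod.mk.injEq]
    and_intros <;> first | rfl | trivial | ring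
  have hsep : ∀ e ∈ (((pvL9 pi pj ci cj).map
        (fun q => (q.1, PySem.Int.floordiv (getCell s ci cj * q.2) 100))) ++
      [((ci + (ci - pi), cj + (cj - pj)),
        getCell s ci cj -
          (((pvL9 pi pj ci cj).map
              (fun q => PySem.Int.floordiv (getCell s ci cj * q.2) 100)).sum))]),
      (0 ≤ e.1.1 ∧ e.1.1 < (s.length : Int) ∧ 0 ≤ e.1.2 ∧ e.1.2 < (s.length : Int)) →
      (e.1.1.toNat ≠ ci.toNat ∨ e.1.2.toNat ≠ cj.toNat) := by
    intro e he hin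
    simp only [pvL9, List.map_cons, List.map_nil, List.mem_append, List.mem_cons,
      List.not_mem_nil, or_false] at he
    rcases hd with hd | hd | hd | hd <;>
      rw [Prod.mk.injEq] at hd <;>
      rcases he with (rfl | rfl | rfl | rfl | rfl | rfl | rfl | rfl | rfl) | rfl <;>
      dsimp only at hin ⊢ <;> omega
  rw [hB, hLB, hA,
      classify_setZero (s.length) ci cj _ s 0 hsep,
      distA_append, distA_somes, zero_add, distA_none_step,
      classify_append, classify_single]
  split_ifs <;> rfl

theorem runMovesS_eq : ∀ (L : List ((Int × Int) × (Int × Int))) (s : List (List Int)) (o : Int),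
    (∀ e ∈ L, GoodMove e) → runMovesS L s o = runMoves L s o := by
  intro L
  induction L with
  | nil => intro s o _; rfl
  | cons e L ih =>
    intro s o h
    rw [runMovesS_cons, runMoves_cons,
        show scatterB e.1 e.2 s = moveSand e.1 e.2 s from
          scatterB_eq e.1 e.2 s (by have := h e (List.mem_cons_self); simpa using this)]
    exact ih _ _ (fun e' he' => h e' (List.mem_cons_of_mem _ he'))

-- ---------- B-side: the corner walk generates exactly A's move list ----------

theorem mem_legSteps : ∀ (t : Nat) (p d : Int × Int) (e : (Int × Int) × (Int × Int)),
    e ∈ legSteps p d t →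
    (e.2.1 - e.1.1, e.2.2 - e.1.2) = d ∧
      ∃ k : Nat, 1 ≤ k ∧ k ≤ t ∧ e.2 = (p.1 + k * d.1, p.2 + k * d.2) := by
  intro t
  induction t with
  | zero => intro p d e he; simp [legSteps] at he
  | succ t ih =>
    intro p d e he
    rw [legSteps] at he
    rcases List.mem_cons.mp he with rfl | he
    · refine ⟨by simp, 1, le_refl 1, by omega, by simp⟩
    · obtain ⟨hd, k, hk1, hk2, hk3⟩ := ih (p.1 + d.1, p.2 + d.2) d e he
      refine ⟨hd, k + 1, by omega, by omega, ?_⟩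
      rw [hk3]
      rw [Prod.mk.injEq]
      constructor <;> push_cast <;> ring

theorem good_legSteps (p d : Int × Int)
    (hd : d = ((0:Int),(1:Int)) ∨ d = ((0:Int),(-1:Int)) ∨ d = ((1:Int),(0:Int)) ∨ d = ((-1:Int),(0:Int)))
    (t : Nat) (h1 : 0 ≤ p.1) (h2 : 0 ≤ p.2)
    (h3 : 0 ≤ p.1 + t * d.1) (h4 : 0 ≤ p.2 + t * d.2) :
    ∀ e ∈ legSteps p d t, GoodMove e := by
  intro e he
  obtain ⟨hdf, k, hk1, hk2, hk3⟩ := mem_legSteps t p d e he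
  unfold GoodMove
  refine ⟨by rw [hdf]; exact hd, ?_, ?_⟩ <;>
    rw [hk3] <;> rcases hd with rfl | rfl | rfl | rfl <;>
    dsimp only at h3 h4 ⊢ <;> omega

theorem good_movesLen (m : Nat) (K : Nat) (hK : K < 2 * m) :
    ∀ e ∈ movesLen (posAt (m : Int) K) (K + 1), GoodMove e := by
  intro e he
  unfold movesLen at he
  by_cases hKp : K % 2 = 0
  · rw [if_pos (by omega : (K + 1) % 2 = 1)] at he
    have hp : posAt (m : Int) K = ((m : Int) - ((K / 2 : Nat) : Int), (m : Int) + ((K / 2 : Nat) : Int)) := by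
      simp [posAt, hKp]
    rw [hp] at he
    rcases List.mem_append.mp he with he | he
    · exact good_legSteps _ _ (Or.inr (Or.inl rfl)) _ (by dsimp only; omega)
        (by dsimp only; omega) (by dsimp only; omega) (by dsimp only; omega) e he
    · exact good_legSteps _ _ (Or.inr (Or.inr (Or.inl rfl))) _ (by dsimp only; omega)
        (by dsimp only; omega) (by dsimp only; omega) (by dsimp only; omega) e he
  · rw [if_neg (by omega : ¬ ((K + 1) % 2 = 1))] at he
    have hp : posAt (m : Int) K = ((m : Int) + (((K + 1) / 2 : Nat) : Int), (m : Int) - (((K + 1) / 2 : Nat) : Int)) := by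
      simp [posAt, hKp]
    rw [hp] at he
    rcases List.mem_append.mp he with he | he
    · exact good_legSteps _ _ (Or.inl rfl) _ (by dsimp only; omega)
        (by dsimp only; omega) (by dsimp only; omega) (by dsimp only; omega) e he
    · exact good_legSteps _ _ (Or.inr (Or.inr (Or.inr rfl))) _ (by dsimp only; omega)
        (by dsimp only; omega) (by dsimp only; omega) (by dsimp only; omega) e he

theorem good_movesUpTo (m : Nat) (_hm : 1 ≤ m) : ∀ K : Nat, K ≤ 2 * m →
    ∀ e ∈ movesUpTo (m : Int) K, GoodMove e := by
  intro K
  induction K with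
  | zero => intro _ e he; simp [movesUpTo] at he
  | succ K ih =>
    intro hK e he
    rw [show movesUpTo (m : Int) (K + 1) = movesUpTo (m : Int) K ++ movesLen (posAt (m : Int) K) (K + 1) from rfl] at he
    rcases List.mem_append.mp he with he | he
    · exact ih (by omega) e he
    · exact good_movesLen m K (by omega) e he

theorem good_final (m : Nat) :
    ∀ e ∈ legSteps ((0 : Int), ((2 * m : Nat) : Int)) (0, -1) (2 * m), GoodMove e := by
  exact good_legSteps _ _ (Or.inr (Or.inl rfl)) _ (by dsimp only; omega)
    (by dsimp only; omega) (by dsimp only; omega) (by dsimp only; omega)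

theorem walkLoop_eq (d : Int × Int)
    (hd : d = ((0:Int),(1:Int)) ∨ d = ((0:Int),(-1:Int)) ∨ d = ((1:Int),(0:Int)) ∨ d = ((-1:Int),(0:Int))) :
    ∀ (t f : Nat), t ≤ f → ∀ (a : Int × Int) (s : List (List Int)) (o : Int),
    walkLoop f a.1 a.2 (a.1 + t * d.1) (a.2 + t * d.2) d.1 d.2 (s, o) =
      runMovesS (legSteps a d t) s o := by
  intro t
  induction t with
  | zero =>
    intro f hf a s o
    simp only [Nat.cast_zero, zero_mul, add_zero]
    cases f with
    | zero => rfl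
    | succ f => rw [walkLoop, if_pos ⟨rfl, rfl⟩]; rfl
  | succ t ih =>
    intro f hf a s o
    obtain ⟨f', rfl⟩ : ∃ f', f = f' + 1 := ⟨f - 1, by omega⟩
    rw [walkLoop,
        if_neg (by rcases hd with rfl | rfl | rfl | rfl <;> dsimp only <;>
                   intro hc <;> push_cast at hc <;> omega)]
    rw [show legSteps a d (t + 1) = (a, (a.1 + d.1, a.2 + d.2)) :: legSteps (a.1 + d.1, a.2 + d.2) d t from rfl,
        runMovesS_cons]
    dsimp only
    rw [show a.1 + ((t + 1 : Nat) : Int) * d.1 = (a.1 + d.1) + (t : Nat) * d.1 from by push_cast; ring,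
        show a.2 + ((t + 1 : Nat) : Int) * d.2 = (a.2 + d.2) + (t : Nat) * d.2 from by push_cast; ring]
    exact ih f' (by omega) (a.1 + d.1, a.2 + d.2) _ _

theorem walkB_eq (d : Int × Int)
    (hd : d = ((0:Int),(1:Int)) ∨ d = ((0:Int),(-1:Int)) ∨ d = ((1:Int),(0:Int)) ∨ d = ((-1:Int),(0:Int)))
    (t : Nat) (a : Int × Int) (s : List (List Int)) (o : Int) :
    walkB a (a.1 + t * d.1, a.2 + t * d.2) (s, o) = runMovesS (legSteps a d t) s o := by
  rcases Nat.eq_zero_or_pos t with rfl | ht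
  · rcases hd with rfl | rfl | rfl | rfl <;>
      simp [walkB, walkLoop, legSteps, runMovesS]
  · unfold walkB
    rcases hd with rfl | rfl | rfl | rfl <;> dsimp only
    · rw [if_neg (by omega), if_neg (by omega), if_pos (by omega : a.2 < a.2 + (t : Int) * 1),
          if_neg (by omega)]
      rw [show ((a.1 + (t:Int) * 0 - a.1).natAbs + (a.2 + (t:Int) * 1 - a.2).natAbs) = t from by omega]
      exact walkLoop_eq ((0:Int), (1:Int)) (Or.inl rfl) t t le_rfl a s o
    · rw [if_neg (by omega), if_neg (by omega), if_neg (by omega),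
          if_pos (by omega : a.2 + (t : Int) * (-1) < a.2)]
      rw [show ((a.1 + (t:Int) * 0 - a.1).natAbs + (a.2 + (t:Int) * (-1) - a.2).natAbs) = t from by omega]
      exact walkLoop_eq ((0:Int), (-1:Int)) (Or.inr (Or.inl rfl)) t t le_rfl a s o
    · rw [if_pos (by omega : a.1 < a.1 + (t : Int) * 1), if_neg (by omega), if_neg (by omega),
          if_neg (by omega)]
      rw [show ((a.1 + (t:Int) * 1 - a.1).natAbs + (a.2 + (t:Int) * 0 - a.2).natAbs) = t from by omega]
      exact walkLoop_eq ((1:Int), (0:Int)) (Or.inr (Or.inr (Or.inl rfl))) t t le_rfl a s o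
    · rw [if_neg (by omega), if_pos (by omega : a.1 + (t : Int) * (-1) < a.1), if_neg (by omega),
          if_neg (by omega)]
      rw [show ((a.1 + (t:Int) * (-1) - a.1).natAbs + (a.2 + (t:Int) * 0 - a.2).natAbs) = t from by omega]
      exact walkLoop_eq ((-1:Int), (0:Int)) (Or.inr (Or.inr (Or.inr rfl))) t t le_rfl a s o

theorem cornerB_posAt (m : Nat) (K : Nat) :
    cornerB (m : Int) ((K : Nat) : Int) = posAt (m : Int) K := by
  unfold cornerB posAt
  rw [PySem.Int.mod_eq_emod_of_pos (by omega),
      PySem.Int.floordiv_eq_ediv_of_pos (show (0:Int) < 2 by omega),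
      PySem.Int.floordiv_eq_ediv_of_pos (show (0:Int) < 2 by omega)]
  by_cases h : K % 2 = 0
  · rw [if_pos (by omega : ((K : Nat) : Int) % 2 = 0), if_pos h, Prod.mk.injEq]
    constructor <;> omega
  · rw [if_neg (by omega : ¬ (((K : Nat) : Int) % 2 = 0)), if_neg h, Prod.mk.injEq]
    constructor <;> omega

theorem ringsB_step (m : Nat) (K : Nat) (_hK : K < 2 * m) (rest : List Int)
    (s : List (List Int)) (o : Int) :
    ringsB (((K + 1 : Nat) : Int) :: rest) (m : Int) (posAt (m : Int) K) (s, o) =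
      ringsB rest (m : Int) (posAt (m : Int) (K + 1))
        (runMovesS (movesLen (posAt (m : Int) K) (K + 1)) s o) := by
  rw [show ringsB (((K + 1 : Nat) : Int) :: rest) (m : Int) (posAt (m : Int) K) (s, o)
      = ringsB rest (m : Int) (cornerB (m : Int) ((K + 1 : Nat) : Int))
          (walkB ((posAt (m : Int) K).1, (cornerB (m : Int) ((K + 1 : Nat) : Int)).2)
            (cornerB (m : Int) ((K + 1 : Nat) : Int))
            (walkB (posAt (m : Int) K)
              ((posAt (m : Int) K).1, (cornerB (m : Int) ((K + 1 : Nat) : Int)).2) (s, o))) from rfl]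
  rw [cornerB_posAt m (K + 1)]
  by_cases hKp : K % 2 = 0
  · have hp : posAt (m : Int) K
        = ((m : Int) - ((K / 2 : Nat) : Int), (m : Int) + ((K / 2 : Nat) : Int)) := by
      simp [posAt, hKp]
    have hq : posAt (m : Int) (K + 1)
        = ((m : Int) + (((K + 1 + 1) / 2 : Nat) : Int), (m : Int) - (((K + 1 + 1) / 2 : Nat) : Int)) := by
      simp only [posAt]; rw [if_neg (by omega)]
    have hL : (K + 1) % 2 = 1 := by omega
    have hmid : ((posAt (m : Int) K).1, (posAt (m : Int) (K + 1)).2)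
        = ((posAt (m : Int) K).1 + ((K + 1 : Nat) : Int) * 0,
           (posAt (m : Int) K).2 + ((K + 1 : Nat) : Int) * (-1)) := by
      rw [hp, hq]; dsimp only; rw [Prod.mk.injEq]
      constructor <;> push_cast <;> omega
    rw [hmid, walkB_eq ((0:Int), (-1:Int)) (Or.inr (Or.inl rfl)) (K + 1) (posAt (m : Int) K) s o]
    have hend : posAt (m : Int) (K + 1)
        = (((posAt (m : Int) K).1 + ((K + 1 : Nat) : Int) * 0) + ((K + 1 : Nat) : Int) * 1,
           ((posAt (m : Int) K).2 + ((K + 1 : Nat) : Int) * (-1)) + ((K + 1 : Nat) : Int) * 0) := by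
      rw [hp, hq]; dsimp only; rw [Prod.mk.injEq]
      constructor <;> push_cast <;> omega
    rw [hend]
    have h2 := walkB_eq ((1:Int), (0:Int)) (Or.inr (Or.inr (Or.inl rfl))) (K + 1)
        ((posAt (m : Int) K).1 + ((K + 1 : Nat) : Int) * 0,
         (posAt (m : Int) K).2 + ((K + 1 : Nat) : Int) * (-1))
        (runMovesS (legSteps (posAt (m : Int) K) (0, -1) (K + 1)) s o).1
        (runMovesS (legSteps (posAt (m : Int) K) (0, -1) (K + 1)) s o).2
    rw [Prod.mk.eta] at h2
    rw [h2]
    rw [show ((posAt (m : Int) K).1 + ((K + 1 : Nat) : Int) * 0,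
             (posAt (m : Int) K).2 + ((K + 1 : Nat) : Int) * (-1))
        = ((posAt (m : Int) K).1, (posAt (m : Int) K).2 - ((K + 1 : Nat) : Int)) from by
          rw [Prod.mk.injEq]; constructor <;> ring]
    rw [show movesLen (posAt (m : Int) K) (K + 1)
        = legSteps (posAt (m : Int) K) (0, -1) (K + 1) ++
          legSteps ((posAt (m : Int) K).1, (posAt (m : Int) K).2 - ((K + 1 : Nat) : Int)) (1, 0) (K + 1) from by
          unfold movesLen; rw [if_pos hL]]
    rw [runMovesS_append]
  · have hp : posAt (m : Int) K
        = ((m : Int) + (((K + 1) / 2 : Nat) : Int), (m : Int) - (((K + 1) / 2 : Nat) : Int)) := by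
      simp [posAt, hKp]
    have hq : posAt (m : Int) (K + 1)
        = ((m : Int) - (((K + 1) / 2 : Nat) : Int), (m : Int) + (((K + 1) / 2 : Nat) : Int)) := by
      simp only [posAt]; rw [if_pos (by omega)]
    have hL : ¬ ((K + 1) % 2 = 1) := by omega
    have hmid : ((posAt (m : Int) K).1, (posAt (m : Int) (K + 1)).2)
        = ((posAt (m : Int) K).1 + ((K + 1 : Nat) : Int) * 0,
           (posAt (m : Int) K).2 + ((K + 1 : Nat) : Int) * 1) := by
      rw [hp, hq]; dsimp only; rw [Prod.mk.injEq]
      constructor <;> push_cast <;> omega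
    rw [hmid, walkB_eq ((0:Int), (1:Int)) (Or.inl rfl) (K + 1) (posAt (m : Int) K) s o]
    have hend : posAt (m : Int) (K + 1)
        = (((posAt (m : Int) K).1 + ((K + 1 : Nat) : Int) * 0) + ((K + 1 : Nat) : Int) * (-1),
           ((posAt (m : Int) K).2 + ((K + 1 : Nat) : Int) * 1) + ((K + 1 : Nat) : Int) * 0) := by
      rw [hp, hq]; dsimp only; rw [Prod.mk.injEq]
      constructor <;> push_cast <;> omega
    rw [hend]
    have h2 := walkB_eq ((-1:Int), (0:Int)) (Or.inr (Or.inr (Or.inr rfl))) (K + 1)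
        ((posAt (m : Int) K).1 + ((K + 1 : Nat) : Int) * 0,
         (posAt (m : Int) K).2 + ((K + 1 : Nat) : Int) * 1)
        (runMovesS (legSteps (posAt (m : Int) K) (0, 1) (K + 1)) s o).1
        (runMovesS (legSteps (posAt (m : Int) K) (0, 1) (K + 1)) s o).2
    rw [Prod.mk.eta] at h2
    rw [h2]
    rw [show ((posAt (m : Int) K).1 + ((K + 1 : Nat) : Int) * 0,
             (posAt (m : Int) K).2 + ((K + 1 : Nat) : Int) * 1)
        = ((posAt (m : Int) K).1, (posAt (m : Int) K).2 + ((K + 1 : Nat) : Int)) from by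
          rw [Prod.mk.injEq]; constructor <;> ring]
    rw [show movesLen (posAt (m : Int) K) (K + 1)
        = legSteps (posAt (m : Int) K) (0, 1) (K + 1) ++
          legSteps ((posAt (m : Int) K).1, (posAt (m : Int) K).2 + ((K + 1 : Nat) : Int)) (-1, 0) (K + 1) from by
          unfold movesLen; rw [if_neg hL]]
    rw [runMovesS_append]

theorem ringsB_seg (m : Nat) (_hm : 1 ≤ m) : ∀ (j K : Nat), K + j = 2 * m →
    ∀ (s : List (List Int)) (o : Int),
    ringsB (PySem.List.pyRange ((K : Int) + 1) (2 * (m : Int) + 1) 1) (m : Int)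
        (posAt (m : Int) K) (s, o) =
      runMovesS (movesSeg2 m K j) s o := by
  intro j
  induction j with
  | zero =>
    intro K hK s o
    obtain rfl : K = 2 * m := by omega
    rw [PySem.List.pyRange_one_eq_nil (by push_cast; omega)]
    rfl
  | succ j ih =>
    intro K hK s o
    rw [PySem.List.pyRange_one_cons (by omega)]
    rw [show (K : Int) + 1 = ((K + 1 : Nat) : Int) from by push_cast; ring]
    rw [ringsB_step m K (by omega) _ s o]
    have h := ih (K + 1) (by omega)
        (runMovesS (movesLen (posAt (m : Int) K) (K + 1)) s o).1
        (runMovesS (movesLen (posAt (m : Int) K) (K + 1)) s o).2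
    rw [Prod.mk.eta] at h
    rw [h]
    rw [show movesSeg2 m K (j + 1)
        = movesLen (posAt (m : Int) K) (K + 1) ++ movesSeg2 m (K + 1) j from rfl,
        runMovesS_append]

theorem movesSeg2_eq (m : Nat) : ∀ (j K : Nat),
    movesUpTo (m : Int) K ++ movesSeg2 m K j = movesUpTo (m : Int) (K + j) := by
  intro j
  induction j with
  | zero => intro K; simp [movesSeg2]
  | succ j ih =>
    intro K
    rw [show movesSeg2 m K (j + 1) = movesLen (posAt m K) (K + 1) ++ movesSeg2 m (K + 1) j from rfl]
    rw [← List.append_assoc]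
    rw [show movesUpTo (m : Int) K ++ movesLen (posAt m K) (K + 1) = movesUpTo (m : Int) (K + 1) from rfl]
    rw [ih (K + 1)]
    rw [show K + (j + 1) = K + 1 + j from by omega]

theorem solutionB_eq (m : Nat) (hm : 1 ≤ m) (sand : List (List Int)) :
    solution_alt (2 * (m : Int) + 1) sand =
      (runMovesS (movesUpTo m (2 * m) ++ legSteps ((0 : Int), ((2 * m : Nat) : Int)) (0, -1) (2 * m))
        sand 0).2 := by
  unfold solution_alt
  rw [if_neg (by omega : ¬ (2 * (m : Int) + 1 < 2))]
  have hc : PySem.Int.floordiv (2 * (m : Int) + 1) 2 = (m : Int) := by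
    rw [PySem.Int.floordiv_eq_ediv_of_pos (by omega)]; omega
  rw [hc]
  dsimp only
  rw [show ((m : Int), (m : Int)) = posAt (m : Int) 0 from by simp [posAt]]
  have h := ringsB_seg m hm (2 * m) 0 (by omega) sand 0
  norm_num at h
  rw [h]
  rw [show ((0 : Int), 2 * (m : Int) + 1 - 1) = ((0 : Int), ((2 * m : Nat) : Int)) from by
        rw [Prod.mk.injEq]; constructor
        · rfl
        · push_cast; ring]
  rw [show ((0 : Int), (0 : Int))
      = (((0 : Int) + ((2 * m : Nat) : Int) * 0, ((2 * m : Nat) : Int) + ((2 * m : Nat) : Int) * (-1))) from by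
        rw [Prod.mk.injEq]; constructor <;> push_cast <;> ring]
  have h2 := walkB_eq ((0:Int), (-1:Int)) (Or.inr (Or.inl rfl)) (2 * m)
      ((0 : Int), ((2 * m : Nat) : Int))
      (runMovesS (movesSeg2 m 0 (2 * m)) sand 0).1
      (runMovesS (movesSeg2 m 0 (2 * m)) sand 0).2
  rw [Prod.mk.eta] at h2
  rw [h2]
  rw [runMovesS_append]
  rw [show movesSeg2 m 0 (2 * m) = movesUpTo (m : Int) (2 * m) from by
        have := movesSeg2_eq m (2 * m) 0
        simpa [movesUpTo] using this]

-- ===== VERDICT (by name: the statement is the Claim_ definition above) =====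
theorem solution_spec : Claim_equal_solution := by
  intro n sand _ hpre
  unfold Spec_solution
  rcases hpre with hneg | ⟨h3, hodd, _, _⟩
  · have e1 : PySem.List.pyRange 1 (n + 1) 1 = [] := PySem.List.pyRange_one_eq_nil (by omega)
    have e2 : solution_alt n sand = 0 := by
      unfold solution_alt; rw [if_pos (by omega : n < 2)]
    simp [solution, e1, outerA, e2]
  · have hodd' : n % 2 = 1 := by
      rw [PySem.Int.mod_eq_emod_of_pos (by omega)] at hodd; exact hodd
    obtain ⟨mm, hn, hm1⟩ : ∃ mm : Nat, n = 2 * (mm : Int) + 1 ∧ 1 ≤ mm := by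
      refine ⟨((n - 1) / 2).toNat, ?_, ?_⟩ <;> omega
    rw [hn, solutionA_eq mm hm1 sand, solutionB_eq mm hm1 sand]
    rw [runMoves_append, runMovesS_append]
    rw [runMovesS_eq _ _ _ (good_movesUpTo mm hm1 (2 * mm) le_rfl)]
    rw [runMovesS_eq _ _ _ (good_final mm)]
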